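-- pv_equiv track=rewrite | github.com/coff33ninja/linkwarden_enhancer | enhancement/bookmark_merger.py | _merge_timestamps
-- ===== SOURCE A (Python) =====
-- from typing import Dict, List, Any, Optional, Set, Tuple
--
-- def _merge_timestamps(bookmarks: List[Dict[str, Any]]) -> Dict[str, Any]:
--     """Merge timestamp fields"""
--     timestamps = {}
--
--     # Collect all timestamps
--     created_times = []
--     updated_times = []
--
--     for bookmark in bookmarks:
--         created = bookmark.get('created_at') or bookmark.get('createdAt')
--         updated = bookmark.get('updated_at') or bookmark.get('updatedAt')
--
--         if created:
--             created_times.append(created)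
--         if updated:
--             updated_times.append(updated)
--
--     # Use earliest created time
--     if created_times:
--         timestamps['created_at'] = min(created_times)
--
--     # Use latest updated time
--     if updated_times:
--         timestamps['updated_at'] = max(updated_times)
--
--     return timestamps
-- ===== SOURCE B (Python) =====
-- def _merge_timestamps(bookmarks):
--     """Merge timestamp fields: sort the candidate timestamps once, take first/last."""
--     created_times = sorted(filter(None, (b.get('created_at') or b.get('createdAt') for b in bookmarks)))
--     updated_times = sorted(filter(None, (b.get('updated_at') or b.get('updatedAt') for b in bookmarks)))
--     timestamps = {}
--     if created_times:
--         timestamps['created_at'] = created_times[0]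
--     if updated_times:
--         timestamps['updated_at'] = updated_times[-1]
--     return timestamps
-- ===== Notes on version B (the rewrite author's own statement) =====
-- stated objective: alternative
-- what changed: Replaces the two explicit collect-then-min()/max() passes by sorting the candidate timestamps (filtered via filter(None, generator)) and indexing the first/last element of the sorted lists; correct because on a total order the head of a sorted list is the minimum value and its last element the maximum, and equal strings are identical so tie-breaking cannot differ.
import Mathlib
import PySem

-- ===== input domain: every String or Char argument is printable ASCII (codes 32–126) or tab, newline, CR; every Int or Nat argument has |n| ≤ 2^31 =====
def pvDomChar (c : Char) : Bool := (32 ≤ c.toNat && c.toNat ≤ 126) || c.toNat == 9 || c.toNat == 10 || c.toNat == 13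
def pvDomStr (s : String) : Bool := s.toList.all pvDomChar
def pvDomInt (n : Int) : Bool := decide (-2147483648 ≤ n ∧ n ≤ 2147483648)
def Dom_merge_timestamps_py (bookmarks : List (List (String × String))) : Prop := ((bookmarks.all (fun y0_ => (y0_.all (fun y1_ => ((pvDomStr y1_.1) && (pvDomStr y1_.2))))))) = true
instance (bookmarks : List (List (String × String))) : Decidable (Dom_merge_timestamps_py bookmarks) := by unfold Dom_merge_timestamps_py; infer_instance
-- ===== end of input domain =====

-- B replaces A's collect-then-min()/max() design by sorting the filtered candidates and taking the first/last element (objective: alternative).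

-- ===== PORT A =====
-- bookmark.get(k1) or bookmark.get(k2)  (Python 'or': left operand unless falsy, i.e. None or "")
def pvGetOr (bm : List (String × String)) (k1 k2 : String) : Option String :=
  match (PySem.Dict.mk bm).get? k1 with
  | some s => if s ≠ "" then some s else (PySem.Dict.mk bm).get? k2
  | none => (PySem.Dict.mk bm).get? k2

-- loop body of A: append truthy created/updated to the two collected lists
def pvStepA (p : List String × List String) (bm : List (String × String)) :
    List String × List String :=
  let created := pvGetOr bm "created_at" "createdAt"
  let updated := pvGetOr bm "updated_at" "updatedAt"
  let cs := match created with
    | some s => if s ≠ "" then p.1 ++ [s] else p.1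
    | none => p.1
  let us := match updated with
    | some s => if s ≠ "" then p.2 ++ [s] else p.2
    | none => p.2
  (cs, us)

def merge_timestamps_py (bookmarks : List (List (String × String))) : List (String × String) :=
  let p := bookmarks.foldl pvStepA ([], [])
  let d : PySem.Dict String String := PySem.Dict.empty
  -- if created_times: timestamps['created_at'] = min(created_times)
  let d := match PySem.List.min? p.1 (fun x => x) with
    | some m => d.insert "created_at" m
    | none => d
  -- if updated_times: timestamps['updated_at'] = max(updated_times)
  let d := match PySem.List.max? p.2 (fun x => x) with
    | some m => d.insert "updated_at" m
    | none => d
  d.items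

-- ===== PORT B =====
-- filter(None, (bookmark.get(k1) or bookmark.get(k2) for bookmark in bookmarks)): keep truthy values
def pvTruthy (o : Option String) : Option String :=
  match o with
  | some s => if s ≠ "" then some s else none
  | none => none

def merge_timestamps_py_alt (bookmarks : List (List (String × String))) : List (String × String) :=
  let created_times := PySem.List.sorted
    (bookmarks.filterMap (fun bm => pvTruthy (pvGetOr bm "created_at" "createdAt"))) (fun x => x) false
  let updated_times := PySem.List.sorted
    (bookmarks.filterMap (fun bm => pvTruthy (pvGetOr bm "updated_at" "updatedAt"))) (fun x => x) false
  let d : PySem.Dict String String := PySem.Dict.empty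
  -- if created_times: timestamps['created_at'] = created_times[0]
  let d := match PySem.List.pyGet? created_times 0 with
    | some v => d.insert "created_at" v
    | none => d
  -- if updated_times: timestamps['updated_at'] = updated_times[-1]
  let d := match PySem.List.pyGet? updated_times (-1) with
    | some v => d.insert "updated_at" v
    | none => d
  d.items

-- ===== PRECONDITION & SPEC =====
def Spec_merge_timestamps_py (bookmarks : List (List (String × String))) (out : List (String × String)) : Prop := out = merge_timestamps_py_alt bookmarks
instance (bookmarks : List (List (String × String))) (out : List (String × String)) : Decidable (Spec_merge_timestamps_py bookmarks out) := by unfold Spec_merge_timestamps_py; infer_instance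

-- ===== CLAIM (what is proved, stated in full; the proofs are below) =====
def Claim_equal_merge_timestamps_py : Prop := ∀ (bookmarks : List (List (String × String))), Dom_merge_timestamps_py bookmarks → Spec_merge_timestamps_py bookmarks (merge_timestamps_py bookmarks)

-- ===== LEMMAS AND PROOFS =====

-- A's fold collects exactly the filterMap'd truthy candidates
theorem pv_foldA (bookmarks : List (List (String × String))) :
    ∀ cs us : List String,
      List.foldl pvStepA (cs, us) bookmarks =
        (cs ++ bookmarks.filterMap (fun bm => pvTruthy (pvGetOr bm "created_at" "createdAt")),
         us ++ bookmarks.filterMap (fun bm => pvTruthy (pvGetOr bm "updated_at" "updatedAt"))) := by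
  induction bookmarks with
  | nil => intro cs us; simp
  | cons bm rest ih =>
      intro cs us
      simp only [List.foldl_cons, List.filterMap_cons]
      rw [ih]
      unfold pvStepA pvTruthy
      rcases pvGetOr bm "created_at" "createdAt" with _ | s <;>
        rcases pvGetOr bm "updated_at" "updatedAt" with _ | t <;>
        simp only [] <;> split_ifs <;> simp

-- min(xs) is the head of sorted(xs)
theorem pv_min_head (xs : List String) :
    PySem.List.min? xs (fun x => x) =
      PySem.List.pyGet? (PySem.List.sorted xs (fun x => x) false) 0 := by
  rw [PySem.List.pyGet?_zero]
  cases hs : PySem.List.sorted xs (fun x => x) false with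
  | nil =>
      have hx : xs = [] := (PySem.List.sorted_eq_nil_iff xs (fun x => x) false).mp hs
      subst hx; simp [PySem.List.min?]
  | cons m t =>
      have hxne : xs ≠ [] := by
        intro h; subst h; simp [PySem.List.sorted] at hs
      obtain ⟨mm, hmm⟩ : ∃ mm, PySem.List.min? xs (fun x => x) = some mm := by
        cases h : PySem.List.min? xs (fun x => x) with
        | none => exact absurd ((PySem.List.min?_eq_none_iff xs (fun x => x)).mp h) hxne
        | some v => exact ⟨v, rfl⟩
      have hmem : mm ∈ xs := PySem.List.min?_mem hmm
      have hmxs : m ∈ xs := by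
        have hm : m ∈ PySem.List.sorted xs (fun x => x) false := by
          rw [hs]; exact List.mem_cons_self
        exact (PySem.List.mem_sorted xs (fun x => x) false m).mp hm
      have h1 : m ≤ mm := PySem.List.key_head_sorted_le xs (fun x => x) hs mm hmem
      have h2 : mm ≤ m := PySem.List.min?_isMin hmm m hmxs
      simp [hmm, le_antisymm h2 h1]

-- max(xs) is the last element of sorted(xs)
theorem pv_max_last (xs : List String) :
    PySem.List.max? xs (fun x => x) =
      PySem.List.pyGet? (PySem.List.sorted xs (fun x => x) false) (-1) := by
  rw [PySem.List.pyGet?_neg_one]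
  cases hne : xs with
  | nil => simp [PySem.List.max?, PySem.List.sorted]
  | cons a b =>
  rw [← hne]
  have hxne : xs ≠ [] := by simp [hne]
  obtain ⟨M, hM⟩ : ∃ M, PySem.List.max? xs (fun x => x) = some M := by
    cases h : PySem.List.max? xs (fun x => x) with
    | none => exact absurd ((PySem.List.max?_eq_none_iff xs (fun x => x)).mp h) hxne
    | some v => exact ⟨v, rfl⟩
  set ys := PySem.List.sorted xs (fun x => x) false with hys
  have hylen : 0 < ys.length := by
    rcases h : ys with _ | ⟨c, d⟩
    · exact absurd ((PySem.List.sorted_eq_nil_iff xs (fun x => x) false).mp (hys ▸ h)) hxne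
    · simp
  have hlast : ys.getLast? = some ys[ys.length - 1] := by
    rw [List.getLast?_eq_getElem?, List.getElem?_eq_getElem (by omega)]
  have hMmem : M ∈ ys := by
    rw [hys, PySem.List.mem_sorted]; exact PySem.List.max?_mem hM
  obtain ⟨p, hp, hpe⟩ := List.getElem_of_mem hMmem
  have hmono : M ≤ ys[ys.length - 1] := by
    rw [← hpe]
    exact PySem.List.key_sorted_getElem_mono xs (fun x => x) (by omega) (by rw [← hys]; omega)
  have hlx : ys[ys.length - 1] ∈ xs := by
    rw [← PySem.List.mem_sorted xs (fun x => x) false, ← hys]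
    exact List.getElem_mem _
  have hle : ys[ys.length - 1] ≤ M := PySem.List.max?_isMax hM _ hlx
  rw [hM, hlast, le_antisymm hmono hle]

-- ===== VERDICT (by name: the statement is the Claim_ definition above) =====
theorem merge_timestamps_py_spec : Claim_equal_merge_timestamps_py := by
  intro bookmarks _
  unfold Spec_merge_timestamps_py merge_timestamps_py merge_timestamps_py_alt
  rw [pv_foldA bookmarks [] []]
  simp only [List.nil_append]
  rw [pv_min_head, pv_max_last]
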